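-- pv_equiv track=rewrite | github.com/posl/comment_recommendation | script/mod_gen/4_time/en/265_D/5.py | check_if_exists
-- ===== SOURCE A (Python) =====
-- def check_if_exists(a, p, q, r):
--     n = len(a)
--     s = [0] * (n + 1)
--     for i in range(n):
--         s[i + 1] = s[i] + a[i]
--     for i in range(n):
--         for j in range(i + 2, n):
--             for k in range(j + 2, n):
--                 for l in range(k + 2, n + 1):
--                     if s[j] - s[i] == p and s[k] - s[j] == q and s[l] - s[k] == r:
--                         return True
--     return False
-- ===== SOURCE B (Python) =====
-- def check_if_exists(a, p, q, r):
--     # O(n): prefix sums + hash sets marking valid left/right endpoints,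
--     # then one scan for a qualifying middle pair.
--     n = len(a)
--     s = [0]
--     for x in a:
--         s.append(s[-1] + x)
--     # right[k]: some l with k+2 <= l <= n and s[l] - s[k] == r
--     right = [False] * (n + 1)
--     seen = set()
--     for k in range(n, -1, -1):
--         if k + 2 <= n:
--             seen.add(s[k + 2])
--         right[k] = (s[k] + r) in seen
--     # left[j]: some i with i+2 <= j and s[j] - s[i] == p
--     left = [False] * (n + 1)
--     lseen = set()
--     for j in range(n + 1):
--         if j >= 2:
--             lseen.add(s[j - 2])
--         left[j] = (s[j] - p) in lseen
--     # middle: some j,k with left[j], right[k], j+2 <= k, s[k]-s[j] == q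
--     good = set()
--     for k in range(n + 1):
--         if k >= 2 and left[k - 2]:
--             good.add(s[k - 2])
--         if right[k] and (s[k] - q) in good:
--             return True
--     return False
-- ===== Notes on version B (the rewrite author's own statement) =====
-- stated objective: faster
-- what changed: Replaced the quadruple nested index scan with a single-pass scheme: prefix sums, a backward set-scan marking right endpoints where a length>=2 suffix-segment sums to r, a forward set-scan marking left endpoints where a length>=2 segment sums to p, then one forward scan with a hash set of valid left prefix values to find a middle segment summing to q.
import Mathlib
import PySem

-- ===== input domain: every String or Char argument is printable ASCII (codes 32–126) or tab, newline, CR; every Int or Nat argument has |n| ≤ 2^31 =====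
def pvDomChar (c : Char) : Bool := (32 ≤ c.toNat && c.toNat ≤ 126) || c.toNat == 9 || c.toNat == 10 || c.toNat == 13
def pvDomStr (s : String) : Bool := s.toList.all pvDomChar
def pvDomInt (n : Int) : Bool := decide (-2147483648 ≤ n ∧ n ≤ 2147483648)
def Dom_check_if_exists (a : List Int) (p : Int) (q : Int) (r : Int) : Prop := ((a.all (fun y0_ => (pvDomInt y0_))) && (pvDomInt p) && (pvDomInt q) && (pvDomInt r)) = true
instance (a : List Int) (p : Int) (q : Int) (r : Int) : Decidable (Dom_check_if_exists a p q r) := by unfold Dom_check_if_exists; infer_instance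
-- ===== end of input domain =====

-- B replaces A's O(n^4) quadruple index scan by an O(n) pass: prefix sums plus
-- hash sets marking valid left/right endpoints, then one scan for a middle pair.

-- ===== PORT A =====
-- the prefix-sum array s (s[i+1] = s[i] + a[i]), built left to right as in both Pythons
def pvPref : Int → List Int → List Int
  | c, [] => [c]
  | c, x :: xs => c :: pvPref (c + x) xs

def check_if_exists (a : List Int) (p : Int) (q : Int) (r : Int) : Bool :=
  let n := a.length
  let s := pvPref 0 a
  (List.range n).any (fun i =>
    (List.range' (i+2) (n - (i+2))).any (fun j =>
      (List.range' (j+2) (n - (j+2))).any (fun k =>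
        (List.range' (k+2) (n+1 - (k+2))).any (fun l =>
          (s.getD j 0 - s.getD i 0 == p) && (s.getD k 0 - s.getD j 0 == q)
            && (s.getD l 0 - s.getD k 0 == r)))))

-- ===== PORT B =====
-- descending loop over k = n..0: seen = {s[l] : l ≥ k+2}; emits right[0..n] (prepending)
def pvRightLoop (s : List Int) (n : Nat) (rr : Int) :
    List Nat → PySem.Set Int → List Bool → List Bool
  | [], _, acc => acc
  | k :: ks, seen, acc =>
    let seen' := if k + 2 ≤ n then PySem.Set.add seen (s.getD (k+2) 0) else seen
    pvRightLoop s n rr ks seen' ((PySem.Set.contains seen' (s.getD k 0 + rr)) :: acc)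

-- ascending loop over j: lseen = {s[i] : i ≤ j-2}; emits left[j] in order
def pvLeftLoop (s : List Int) (pp : Int) : List Nat → PySem.Set Int → List Bool
  | [], _ => []
  | j :: js, seen =>
    let seen' := if 2 ≤ j then PySem.Set.add seen (s.getD (j-2) 0) else seen
    (PySem.Set.contains seen' (s.getD j 0 - pp)) :: pvLeftLoop s pp js seen'

-- final ascending scan with good = {s[j] : j ≤ k-2 and left[j]}, early return on hit
def pvFinalLoop (s : List Int) (qq : Int) (left right : List Bool) :
    List Nat → PySem.Set Int → Bool
  | [], _ => false
  | k :: ks, good =>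
    let good' := if 2 ≤ k ∧ left.getD (k-2) false = true
                 then PySem.Set.add good (s.getD (k-2) 0) else good
    if right.getD k false = true ∧ PySem.Set.contains good' (s.getD k 0 - qq) = true
    then true
    else pvFinalLoop s qq left right ks good'

def check_if_exists_alt (a : List Int) (p : Int) (q : Int) (r : Int) : Bool :=
  let n := a.length
  let s := pvPref 0 a
  let right := pvRightLoop s n r ((List.range (n+1)).reverse) PySem.Set.empty []
  let left := pvLeftLoop s p (List.range (n+1)) PySem.Set.empty
  pvFinalLoop s q left right (List.range (n+1)) PySem.Set.empty

-- ===== PRECONDITION & SPEC =====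
def Spec_check_if_exists (a : List Int) (p : Int) (q : Int) (r : Int) (out : Bool) : Prop := out = check_if_exists_alt a p q r
instance (a : List Int) (p : Int) (q : Int) (r : Int) (out : Bool) : Decidable (Spec_check_if_exists a p q r out) := by unfold Spec_check_if_exists; infer_instance

-- ===== CLAIM (what is proved, stated in full; the proofs are below) =====
def Claim_equal_check_if_exists : Prop := ∀ (a : List Int) (p : Int) (q : Int) (r : Int), Dom_check_if_exists a p q r → Spec_check_if_exists a p q r (check_if_exists a p q r)

-- ===== LEMMAS AND PROOFS =====

-- Bool glue
theorem pv_bool_eq_of_iff {a b : Bool} (h : a = true ↔ b = true) : a = b := by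
  cases a <;> cases b <;> simp_all

-- the pointwise meaning of right[k] / left[j]
def pvFR (s : List Int) (n : Nat) (rr : Int) (k : Nat) : Bool :=
  (List.range (n+1)).any (fun l => decide (k+2 ≤ l) && (s.getD l 0 == s.getD k 0 + rr))

def pvFL (s : List Int) (pp : Int) (j : Nat) : Bool :=
  (List.range (j+1)).any (fun i => decide (i+2 ≤ j) && (s.getD i 0 == s.getD j 0 - pp))

theorem pvFR_iff (s : List Int) (n : Nat) (rr : Int) (k : Nat) :
    pvFR s n rr k = true ↔ ∃ l, k+2 ≤ l ∧ l ≤ n ∧ s.getD l 0 = s.getD k 0 + rr := by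
  simp only [pvFR, List.any_eq_true, List.mem_range, Bool.and_eq_true, decide_eq_true_eq,
    beq_iff_eq]
  constructor
  · rintro ⟨l, h1, h2, h3⟩; exact ⟨l, h2, by omega, h3⟩
  · rintro ⟨l, h1, h2, h3⟩; exact ⟨l, by omega, h1, h3⟩

theorem pvFL_iff (s : List Int) (pp : Int) (j : Nat) :
    pvFL s pp j = true ↔ ∃ i, i+2 ≤ j ∧ s.getD i 0 = s.getD j 0 - pp := by
  simp only [pvFL, List.any_eq_true, List.mem_range, Bool.and_eq_true, decide_eq_true_eq,
    beq_iff_eq]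
  constructor
  · rintro ⟨i, h1, h2, h3⟩; exact ⟨i, h2, h3⟩
  · rintro ⟨i, h1, h2⟩; exact ⟨i, by omega, h1, h2⟩

-- stepping the `seen` set of the right-endpoint loop from threshold m+3 to m+2
theorem pvSeenShift (s : List Int) (n m : Nat) (seen : PySem.Set Int)
    (hseen : ∀ x : Int, x ∈ seen ↔ ∃ l, m+3 ≤ l ∧ l ≤ n ∧ s.getD l 0 = x) :
    ∀ x : Int, x ∈ (if m+2 ≤ n then PySem.Set.add seen (s.getD (m+2) 0) else seen) ↔
      ∃ l, m+2 ≤ l ∧ l ≤ n ∧ s.getD l 0 = x := by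
  intro x
  by_cases h2 : m+2 ≤ n
  · simp only [if_pos h2, PySem.Set.mem_add, hseen]
    constructor
    · rintro (⟨l, h1, h3, h4⟩ | hx)
      · exact ⟨l, by omega, h3, h4⟩
      · exact ⟨m+2, le_refl _, h2, hx.symm⟩
    · rintro ⟨l, h1, h3, h4⟩
      by_cases hl : m+3 ≤ l
      · exact Or.inl ⟨l, hl, h3, h4⟩
      · have hle : l = m+2 := by omega
        subst hle; exact Or.inr h4.symm
  · simp only [if_neg h2, hseen]
    constructor
    · rintro ⟨l, h1, h3, h4⟩; exact ⟨l, by omega, h3, h4⟩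
    · rintro ⟨l, h1, h3, h4⟩; exact absurd (le_trans h1 h3) h2

theorem pvRightLoop_eq (s : List Int) (n : Nat) (rr : Int) :
    ∀ (m : Nat) (seen : PySem.Set Int) (acc : List Bool),
      (∀ x : Int, x ∈ seen ↔ ∃ l, m+3 ≤ l ∧ l ≤ n ∧ s.getD l 0 = x) →
      pvRightLoop s n rr ((List.range (m+1)).reverse) seen acc
        = (List.range (m+1)).map (pvFR s n rr) ++ acc := by
  intro m
  induction m with
  | zero =>
    intro seen acc hseen
    have hshift := pvSeenShift s n 0 seen hseen
    show pvRightLoop s n rr [0] seen acc = [pvFR s n rr 0] ++ acc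
    simp only [pvRightLoop]
    congr 1
    apply pv_bool_eq_of_iff
    rw [PySem.Set.contains_iff, pvFR_iff]
    exact hshift _
  | succ m ih =>
    intro seen acc hseen
    have hrev : (List.range (m+2)).reverse = (m+1) :: (List.range (m+1)).reverse := by
      rw [List.range_succ, List.reverse_append]; simp
    rw [hrev]
    simp only [pvRightLoop]
    have hshift := pvSeenShift s n (m+1) seen hseen
    rw [ih _ _ (by intro x; exact hshift x)]
    rw [List.range_succ (n := m+1), List.map_append, List.append_assoc]
    congr 1
    simp only [List.map_cons, List.map_nil, List.singleton_append]
    congr 1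
    apply pv_bool_eq_of_iff
    rw [PySem.Set.contains_iff, pvFR_iff]
    exact hshift _

-- stepping the `lseen` set of the left-endpoint loop
theorem pvLSeenShift (s : List Int) (j0 : Nat) (seen : PySem.Set Int)
    (hseen : ∀ x : Int, x ∈ seen ↔ ∃ i, i+3 ≤ j0 ∧ s.getD i 0 = x) :
    ∀ x : Int, x ∈ (if 2 ≤ j0 then PySem.Set.add seen (s.getD (j0-2) 0) else seen) ↔
      ∃ i, i+2 ≤ j0 ∧ s.getD i 0 = x := by
  intro x
  by_cases h2 : 2 ≤ j0
  · simp only [if_pos h2, PySem.Set.mem_add, hseen]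
    constructor
    · rintro (⟨i, h1, h4⟩ | hx)
      · exact ⟨i, by omega, h4⟩
      · exact ⟨j0-2, by omega, hx.symm⟩
    · rintro ⟨i, h1, h4⟩
      by_cases hi : i+3 ≤ j0
      · exact Or.inl ⟨i, hi, h4⟩
      · have hie : i = j0-2 := by omega
        subst hie; exact Or.inr h4.symm
  · simp only [if_neg h2, hseen]
    constructor
    · rintro ⟨i, h1, h4⟩; exact ⟨i, by omega, h4⟩
    · rintro ⟨i, h1, h4⟩; exact absurd h1 (by omega)

theorem pvLeftLoop_eq (s : List Int) (pp : Int) :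
    ∀ (len j0 : Nat) (seen : PySem.Set Int),
      (∀ x : Int, x ∈ seen ↔ ∃ i, i+3 ≤ j0 ∧ s.getD i 0 = x) →
      pvLeftLoop s pp (List.range' j0 len) seen = (List.range' j0 len).map (pvFL s pp) := by
  intro len
  induction len with
  | zero => intro j0 seen _; simp [pvLeftLoop]
  | succ len ih =>
    intro j0 seen hseen
    rw [List.range'_succ]
    simp only [pvLeftLoop, List.map_cons]
    have hshift := pvLSeenShift s j0 seen hseen
    rw [ih (j0+1) _ (by
      intro x
      rw [hshift x]
      constructor
      · rintro ⟨i, h1, h4⟩; exact ⟨i, by omega, h4⟩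
      · rintro ⟨i, h1, h4⟩; exact ⟨i, by omega, h4⟩)]
    congr 1
    apply pv_bool_eq_of_iff
    rw [PySem.Set.contains_iff, pvFL_iff]
    exact hshift _

-- stepping the `good` set of the final scan
theorem pvGoodShift (s : List Int) (k0 : Nat) (left : List Bool) (good : PySem.Set Int)
    (hgood : ∀ x : Int, x ∈ good ↔ ∃ j, j+3 ≤ k0 ∧ left.getD j false = true ∧ s.getD j 0 = x) :
    ∀ x : Int, x ∈ (if 2 ≤ k0 ∧ left.getD (k0-2) false = true
        then PySem.Set.add good (s.getD (k0-2) 0) else good) ↔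
      ∃ j, j+2 ≤ k0 ∧ left.getD j false = true ∧ s.getD j 0 = x := by
  intro x
  by_cases h2 : 2 ≤ k0 ∧ left.getD (k0-2) false = true
  · simp only [if_pos h2, PySem.Set.mem_add, hgood]
    constructor
    · rintro (⟨j, h1, h3, h4⟩ | hx)
      · exact ⟨j, by omega, h3, h4⟩
      · exact ⟨k0-2, by omega, h2.2, hx.symm⟩
    · rintro ⟨j, h1, h3, h4⟩
      by_cases hj : j+3 ≤ k0
      · exact Or.inl ⟨j, hj, h3, h4⟩
      · have hje : j = k0-2 := by omega
        subst hje; exact Or.inr h4.symm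
  · simp only [if_neg h2, hgood]
    constructor
    · rintro ⟨j, h1, h3, h4⟩; exact ⟨j, by omega, h3, h4⟩
    · rintro ⟨j, h1, h3, h4⟩
      by_cases hj : j+3 ≤ k0
      · exact ⟨j, hj, h3, h4⟩
      · exfalso
        apply h2
        refine ⟨by omega, ?_⟩
        have hje : k0-2 = j := by omega
        rw [hje]; exact h3

theorem pvFinalLoop_iff (s : List Int) (qq : Int) (left right : List Bool) :
    ∀ (len k0 : Nat) (good : PySem.Set Int),
      (∀ x : Int, x ∈ good ↔ ∃ j, j+3 ≤ k0 ∧ left.getD j false = true ∧ s.getD j 0 = x) →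
      (pvFinalLoop s qq left right (List.range' k0 len) good = true ↔
        ∃ k, k0 ≤ k ∧ k < k0 + len ∧ right.getD k false = true ∧
          ∃ j, j+2 ≤ k ∧ left.getD j false = true ∧ s.getD j 0 = s.getD k 0 - qq) := by
  intro len
  induction len with
  | zero =>
    intro k0 good _
    simp only [List.range'_zero, pvFinalLoop]
    constructor
    · intro h; cases h
    · rintro ⟨k, h1, h2, _⟩; exact absurd h2 (by omega)
  | succ len ih =>
    intro k0 good hgood
    rw [List.range'_succ]
    simp only [pvFinalLoop]
    have hshift := pvGoodShift s k0 left good hgood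
    by_cases hret : right.getD k0 false = true ∧
        PySem.Set.contains (if 2 ≤ k0 ∧ left.getD (k0-2) false = true
          then PySem.Set.add good (s.getD (k0-2) 0) else good) (s.getD k0 0 - qq) = true
    · rw [if_pos hret]
      constructor
      · intro _
        have hmem := (PySem.Set.contains_iff _ _).mp hret.2
        obtain ⟨j, hj1, hj2, hj3⟩ := (hshift _).mp hmem
        exact ⟨k0, le_refl _, by omega, hret.1, j, hj1, hj2, hj3⟩
      · intro _; rfl
    · rw [if_neg hret]
      rw [ih (k0+1) _ (by
        intro x
        rw [hshift x]
        constructor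
        · rintro ⟨j, h1, h3, h4⟩; exact ⟨j, by omega, h3, h4⟩
        · rintro ⟨j, h1, h3, h4⟩; exact ⟨j, by omega, h3, h4⟩)]
      constructor
      · rintro ⟨k, h1, h2, h3, hj⟩; exact ⟨k, by omega, by omega, h3, hj⟩
      · rintro ⟨k, h1, h2, h3, j, hj1, hj2, hj3⟩
        by_cases hk : k0+1 ≤ k
        · exact ⟨k, hk, by omega, h3, j, hj1, hj2, hj3⟩
        · exfalso
          have hke : k = k0 := by omega
          subst hke
          apply hret
          refine ⟨h3, (PySem.Set.contains_iff _ _).mpr ?_⟩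
          exact (hshift _).mpr ⟨j, hj1, hj2, hj3⟩

-- getD on the mapped range lists
theorem pvMapGetD (n k : Nat) (f : Nat → Bool) (hk : k ≤ n) :
    ((List.range (n+1)).map f).getD k false = f k := by
  have hlt : k < ((List.range (n+1)).map f).length := by
    simp [List.length_map, List.length_range]; omega
  rw [List.getD_eq_getElem _ _ hlt]
  simp

-- the common existential specification
theorem pvA_iff (a : List Int) (p q r : Int) :
    check_if_exists a p q r = true ↔
      ∃ i j k l : Nat, i+2 ≤ j ∧ j+2 ≤ k ∧ k+2 ≤ l ∧ l ≤ a.length ∧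
        (pvPref 0 a).getD j 0 - (pvPref 0 a).getD i 0 = p ∧
        (pvPref 0 a).getD k 0 - (pvPref 0 a).getD j 0 = q ∧
        (pvPref 0 a).getD l 0 - (pvPref 0 a).getD k 0 = r := by
  simp only [check_if_exists, List.any_eq_true, List.mem_range, List.mem_range'_1,
    Bool.and_eq_true, beq_iff_eq]
  constructor
  · rintro ⟨i, hi, j, ⟨hj1, hj2⟩, k, ⟨hk1, hk2⟩, l, ⟨hl1, hl2⟩, ⟨e1, e2⟩, e3⟩
    exact ⟨i, j, k, l, hj1, hk1, hl1, by omega, e1, e2, e3⟩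
  · rintro ⟨i, j, k, l, hj, hk, hl, hn, e1, e2, e3⟩
    exact ⟨i, by omega, j, ⟨hj, by omega⟩, k, ⟨hk, by omega⟩, l, ⟨hl, by omega⟩, ⟨e1, e2⟩, e3⟩

theorem pvB_iff (a : List Int) (p q r : Int) :
    check_if_exists_alt a p q r = true ↔
      ∃ i j k l : Nat, i+2 ≤ j ∧ j+2 ≤ k ∧ k+2 ≤ l ∧ l ≤ a.length ∧
        (pvPref 0 a).getD j 0 - (pvPref 0 a).getD i 0 = p ∧
        (pvPref 0 a).getD k 0 - (pvPref 0 a).getD j 0 = q ∧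
        (pvPref 0 a).getD l 0 - (pvPref 0 a).getD k 0 = r := by
  set n := a.length with hn
  set s := pvPref 0 a with hs
  have hempty : ∀ x : Int, x ∈ (PySem.Set.empty : PySem.Set Int) ↔ False := by
    intro x; simp [PySem.Set.empty]
  have hright : pvRightLoop s n r ((List.range (n+1)).reverse) PySem.Set.empty []
      = (List.range (n+1)).map (pvFR s n r) := by
    rw [pvRightLoop_eq s n r n PySem.Set.empty [] (by
      intro x
      rw [hempty x]
      constructor
      · intro h; cases h
      · rintro ⟨l, h1, h2, _⟩; exact absurd (le_trans h1 h2) (by omega))]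
    simp
  have hleft : pvLeftLoop s p (List.range (n+1)) PySem.Set.empty
      = (List.range (n+1)).map (pvFL s p) := by
    rw [List.range_eq_range']
    exact pvLeftLoop_eq s p (n+1) 0 PySem.Set.empty (by
      intro x
      rw [hempty x]
      constructor
      · intro h; cases h
      · rintro ⟨i, h1, _⟩; exact absurd h1 (by omega))
  have hmain : check_if_exists_alt a p q r = true ↔
      ∃ k, 0 ≤ k ∧ k < 0 + (n+1) ∧
        ((List.range (n+1)).map (pvFR s n r)).getD k false = true ∧
        ∃ j, j+2 ≤ k ∧ ((List.range (n+1)).map (pvFL s p)).getD j false = true ∧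
          s.getD j 0 = s.getD k 0 - q := by
    rw [show check_if_exists_alt a p q r
        = pvFinalLoop s q (pvLeftLoop s p (List.range (n+1)) PySem.Set.empty)
            (pvRightLoop s n r ((List.range (n+1)).reverse) PySem.Set.empty [])
            (List.range (n+1)) PySem.Set.empty from rfl]
    rw [hright, hleft, List.range_eq_range']
    exact pvFinalLoop_iff s q _ _ (n+1) 0 PySem.Set.empty (by
      intro x
      rw [hempty x]
      constructor
      · intro h; cases h
      · rintro ⟨j, h1, _⟩; exact absurd h1 (by omega))
  rw [hmain]
  constructor
  · rintro ⟨k, _, hk2, hfr, j, hj2, hfl, hjq⟩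
    have hkn : k ≤ n := by omega
    rw [pvMapGetD n k _ hkn, pvFR_iff] at hfr
    obtain ⟨l, hl1, hl2, hl3⟩ := hfr
    rw [pvMapGetD n j _ (by omega), pvFL_iff] at hfl
    obtain ⟨i, hi1, hi2⟩ := hfl
    exact ⟨i, j, k, l, hi1, hj2, hl1, hl2, by omega, by omega, by omega⟩
  · rintro ⟨i, j, k, l, hj, hk, hl, hln, e1, e2, e3⟩
    have hkn : k ≤ n := by omega
    refine ⟨k, by omega, by omega, ?_, j, hk, ?_, by omega⟩
    · rw [pvMapGetD n k _ hkn, pvFR_iff]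
      exact ⟨l, hl, hln, by omega⟩
    · rw [pvMapGetD n j _ (by omega), pvFL_iff]
      exact ⟨i, hj, by omega⟩

-- ===== VERDICT (by name: the statement is the Claim_ definition above) =====
theorem check_if_exists_spec : Claim_equal_check_if_exists := by
  intro a p q r _
  unfold Spec_check_if_exists
  exact pv_bool_eq_of_iff ((pvA_iff a p q r).trans (pvB_iff a p q r).symm)
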